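-- pv_equiv track=rewrite | github.com/mcada/friends_on_fire | Game.py | _bindings_to_key_maps
-- ===== SOURCE A (Python) =====
-- def _bindings_to_key_maps(bindings):
--     """Build key->action maps for a single player's bindings."""
--     down, up = {}, {}
--     for action, keys in bindings.items():
--         for key in keys:
--             if action == "fire":
--                 down.setdefault(key, []).append("space")
--                 down.setdefault(key, []).append("toggle_autofire")
--                 up.setdefault(key, []).append("space")
--             elif action == "cycle_weapon":
--                 down.setdefault(key, []).append("cycle_weapon")
--             else:
--                 down.setdefault(key, []).append(action)
--                 up.setdefault(key, []).append(action)
--     return down, up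
-- ===== SOURCE B (Python) =====
-- def _expand(bindings, table):
--     """One key->actions map: each binding's action is translated by `table`
--     and its expansion appended for every key; empty expansions are skipped."""
--     out = {}
--     for action, keys in bindings.items():
--         acts = table(action)
--         if not acts:
--             continue
--         for key in keys:
--             out.setdefault(key, []).extend(acts)
--     return out
--
--
-- def _bindings_to_key_maps(bindings):
--     """Build key->action maps for a single player's bindings."""
--     down = _expand(bindings, lambda a: ["space", "toggle_autofire"] if a == "fire" else [a])
--     up = _expand(bindings, lambda a: ["space"] if a == "fire" else ([] if a == "cycle_weapon" else [a]))
--     return down, up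
-- ===== Notes on version B (the rewrite author's own statement) =====
-- stated objective: simpler
-- what changed: Replaces the three-way branch with two independent passes of one generic helper that expands each action through a per-map translation table (down: fire->[space,toggle_autofire], else [action]; up: fire->[space], cycle_weapon->[], else [action]) and extends the per-key list at once, skipping empty expansions.
import Mathlib
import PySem

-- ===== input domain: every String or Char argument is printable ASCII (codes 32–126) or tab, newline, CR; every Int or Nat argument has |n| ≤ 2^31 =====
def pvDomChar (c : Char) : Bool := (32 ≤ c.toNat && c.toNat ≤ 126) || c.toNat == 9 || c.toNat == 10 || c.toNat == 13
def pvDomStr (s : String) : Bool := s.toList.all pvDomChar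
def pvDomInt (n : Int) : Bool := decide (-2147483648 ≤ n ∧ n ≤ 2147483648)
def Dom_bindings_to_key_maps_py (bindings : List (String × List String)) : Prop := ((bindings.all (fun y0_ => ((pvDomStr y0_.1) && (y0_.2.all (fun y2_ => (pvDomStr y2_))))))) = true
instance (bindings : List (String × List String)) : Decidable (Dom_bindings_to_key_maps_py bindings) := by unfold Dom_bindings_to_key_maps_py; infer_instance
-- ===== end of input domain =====

-- B restructures A's three-way branch as two passes of one generic table-driven helper (objective: simpler).

-- ===== PORT A =====
-- d.setdefault(key, []).append(v)
def pvApp (d : PySem.Dict String (List String)) (k v : String) :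
    PySem.Dict String (List String) :=
  d.modify k [] (· ++ [v])

def bindings_to_key_maps_py (bindings : List (String × List String)) :
    (List (String × List String)) × (List (String × List String)) :=
  let du := bindings.foldl
    (fun (du : PySem.Dict String (List String) × PySem.Dict String (List String)) p =>
      p.2.foldl
        (fun du key =>
          if p.1 = "fire" then
            (pvApp (pvApp du.1 key "space") key "toggle_autofire", pvApp du.2 key "space")
          else if p.1 = "cycle_weapon" then
            (pvApp du.1 key "cycle_weapon", du.2)
          else
            (pvApp du.1 key p.1, pvApp du.2 key p.1))
        du)
    (PySem.Dict.empty, PySem.Dict.empty)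
  (du.1.items, du.2.items)

-- ===== PORT B =====
-- _expand: one map; each action translated by `table`, empty expansions skipped,
-- out.setdefault(key, []).extend(acts)
def pvExpand (bindings : List (String × List String)) (table : String → List String) :
    PySem.Dict String (List String) :=
  bindings.foldl
    (fun out p =>
      let acts := table p.1
      if acts.isEmpty then out
      else p.2.foldl (fun out key => out.modify key [] (· ++ acts)) out)
    PySem.Dict.empty

def bindings_to_key_maps_py_alt (bindings : List (String × List String)) :
    (List (String × List String)) × (List (String × List String)) :=
  ((pvExpand bindings (fun a => if a = "fire" then ["space", "toggle_autofire"] else [a])).items,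
   (pvExpand bindings (fun a => if a = "fire" then ["space"] else if a = "cycle_weapon" then [] else [a])).items)

-- ===== PRECONDITION & SPEC =====
def Spec_bindings_to_key_maps_py (bindings : List (String × List String)) (out : (List (String × List String)) × (List (String × List String))) : Prop := out = bindings_to_key_maps_py_alt bindings
instance (bindings : List (String × List String)) (out : (List (String × List String)) × (List (String × List String))) : Decidable (Spec_bindings_to_key_maps_py bindings out) := by unfold Spec_bindings_to_key_maps_py; infer_instance

-- ===== CLAIM (what is proved, stated in full; the proofs are below) =====
def Claim_equal_bindings_to_key_maps_py : Prop := ∀ (bindings : List (String × List String)), Dom_bindings_to_key_maps_py bindings → Spec_bindings_to_key_maps_py bindings (bindings_to_key_maps_py bindings)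

-- ===== LEMMAS AND PROOFS =====

-- inserting twice at the same key equals inserting the second value once
theorem pv_insert_insert_self (d : PySem.Dict String (List String)) (k : String)
    (v w : List String) : (d.insert k v).insert k w = d.insert k w := by
  apply PySem.Dict.ext
  rcases Bool.eq_false_or_eq_true (d.contains k) with h | h 
  · rw [PySem.Dict.items_insert_of_contains _ w (PySem.Dict.contains_insert_self ..),
        PySem.Dict.items_insert_of_contains _ v h,
        PySem.Dict.items_insert_of_contains _ w h,
        List.map_map]
    apply List.map_congr_left
    intro p _
    by_cases hp : p.1 = k <;> simp [hp]
  · rw [PySem.Dict.items_insert_of_contains _ w (PySem.Dict.contains_insert_self ..),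
        PySem.Dict.items_insert_of_not_contains _ v h,
        PySem.Dict.items_insert_of_not_contains _ w h,
        List.map_append]
    have hne : ∀ p ∈ d.items, ¬ p.1 = k := by
      intro p hp hpk
      rw [(PySem.Dict.contains_iff_mem_keys _ _).2 (hpk ▸ PySem.Dict.mem_keys_of_mem_items _ hp)] at h
      cases h
    congr 1
    · rw [show d.items = List.map id d.items from (List.map_id _).symm]
      rw [List.map_map]
      apply List.map_congr_left
      intro p hp
      simp [hne p hp]
    · simp

-- two appends at the same key fuse into one extend
theorem pv_app_app (d : PySem.Dict String (List String)) (k x y : String) :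
    pvApp (pvApp d k x) k y = d.modify k [] (· ++ [x, y]) := by
  show ((d.insert k _).insert k (((d.insert k (d.getD k [] ++ [x])).getD k []) ++ [y])) = _
  rw [PySem.Dict.getD_insert_self, pv_insert_insert_self]
  show _ = d.insert k (d.getD k [] ++ [x, y])
  congr 1
  simp

-- a fold on a pair with componentwise steps splits
theorem pv_foldl_pair {α : Type} (f g : PySem.Dict String (List String) → α → PySem.Dict String (List String))
    (l : List α) (d u : PySem.Dict String (List String)) :
    l.foldl (fun (du : _ × _) k => (f du.1 k, g du.2 k)) (d, u) =
      (l.foldl f d, l.foldl g u) := by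
  induction l generalizing d u with
  | nil => rfl
  | cons a l ih => simpa using ih (f d a) (g u a)

theorem pv_main (bindings : List (String × List String))
    (d u : PySem.Dict String (List String)) :
    bindings.foldl
      (fun (du : PySem.Dict String (List String) × PySem.Dict String (List String)) p =>
        p.2.foldl
          (fun du key =>
            if p.1 = "fire" then
              (pvApp (pvApp du.1 key "space") key "toggle_autofire", pvApp du.2 key "space")
            else if p.1 = "cycle_weapon" then
              (pvApp du.1 key "cycle_weapon", du.2)
            else
              (pvApp du.1 key p.1, pvApp du.2 key p.1))
          du)
      (d, u) =
    (bindings.foldl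
      (fun out p =>
        let acts := (fun a => if a = "fire" then ["space", "toggle_autofire"] else [a]) p.1
        if acts.isEmpty then out
        else p.2.foldl (fun out key => out.modify key [] (· ++ acts)) out) d,
     bindings.foldl
      (fun out p =>
        let acts := (fun a => if a = "fire" then ["space"] else if a = "cycle_weapon" then [] else [a]) p.1
        if acts.isEmpty then out
        else p.2.foldl (fun out key => out.modify key [] (· ++ acts)) out) u) := by
  induction bindings generalizing d u with
  | nil => rfl
  | cons p bs ih =>
    simp only [List.foldl_cons]
    rw [ih]
    have h : p.2.foldl
        (fun (du : PySem.Dict String (List String) × PySem.Dict String (List String)) key =>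
          if p.1 = "fire" then
            (pvApp (pvApp du.1 key "space") key "toggle_autofire", pvApp du.2 key "space")
          else if p.1 = "cycle_weapon" then
            (pvApp du.1 key "cycle_weapon", du.2)
          else
            (pvApp du.1 key p.1, pvApp du.2 key p.1)) (d, u) =
        ((fun out (p : String × List String) =>
            let acts := (fun a => if a = "fire" then ["space", "toggle_autofire"] else [a]) p.1
            if acts.isEmpty then out
            else p.2.foldl (fun out key => out.modify key [] (· ++ acts)) out) d p,
         (fun out (p : String × List String) =>
            let acts := (fun a => if a = "fire" then ["space"] else if a = "cycle_weapon" then [] else [a]) p.1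
            if acts.isEmpty then out
            else p.2.foldl (fun out key => out.modify key [] (· ++ acts)) out) u p) := by
      by_cases hf : p.1 = "fire"
      · simp only [hf, reduceIte, List.isEmpty_cons, Bool.false_eq_true, if_false]
        rw [show (fun (du : PySem.Dict String (List String) × PySem.Dict String (List String)) key =>
              (pvApp (pvApp du.1 key "space") key "toggle_autofire", pvApp du.2 key "space")) =
            (fun du key => ((fun d k => d.modify k [] (· ++ ["space", "toggle_autofire"])) du.1 key,
                            (fun d k => d.modify k [] (· ++ ["space"])) du.2 key)) by
            funext du key; rw [pv_app_app]; rfl]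
        exact pv_foldl_pair (fun d k => d.modify k [] (· ++ ["space", "toggle_autofire"]))
          (fun d k => d.modify k [] (· ++ ["space"])) p.2 d u
      · by_cases hc : p.1 = "cycle_weapon"
        · simp only [hc, if_neg (by decide : ¬ ("cycle_weapon" : String) = "fire"),
            List.isEmpty_cons, List.isEmpty_nil, Bool.false_eq_true, if_false, if_true]
          exact ((pv_foldl_pair (fun d k => d.modify k [] (· ++ ["cycle_weapon"])) (fun u _ => u) p.2 d u).trans
            (by rw [List.foldl_fixed]))
        · simp only [if_neg hf, if_neg hc, List.isEmpty_cons, Bool.false_eq_true, if_false]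
          exact pv_foldl_pair (fun d k => pvApp d k p.1) (fun u k => pvApp u k p.1) p.2 d u
    rw [h]

-- ===== VERDICT (by name: the statement is the Claim_ definition above) =====
theorem bindings_to_key_maps_py_spec : Claim_equal_bindings_to_key_maps_py := by
  intro bindings _
  show _ = bindings_to_key_maps_py_alt bindings
  unfold bindings_to_key_maps_py bindings_to_key_maps_py_alt pvExpand
  rw [pv_main]
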